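-- pv_equiv track=rewrite | github.com/Viktorkozh/Algorithmization | task 18.py | find_max_min_sum
-- ===== SOURCE A (Python) =====
-- def find_max_min_sum(matrix):
--     n = len(matrix)
--     max_sum = [[0] * n for _ in range(n)]
--     min_sum = [[0] * n for _ in range(n)]
--     max_sum[0][0] = min_sum[0][0] = matrix[0][0]
--
--     for j in range(1, n):
--         max_sum[0][j] = max_sum[0][j-1] + matrix[0][j]
--         min_sum[0][j] = min_sum[0][j-1] + matrix[0][j]
--
--     for i in range(1, n):
--         max_sum[i][0] = max_sum[i-1][0] + matrix[i][0]
--         min_sum[i][0] = min_sum[i-1][0] + matrix[i][0]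
--
--     for i in range(1, n):
--         for j in range(1, n):
--             max_sum[i][j] = max(max_sum[i-1][j], max_sum[i][j-1]) + matrix[i][j]
--             min_sum[i][j] = min(min_sum[i-1][j], min_sum[i][j-1]) + matrix[i][j]
--
--     return max_sum[n-1][n-1], min_sum[n-1][n-1]
-- ===== SOURCE B (Python) =====
-- def find_max_min_sum(matrix):
--     memo = {}
--
--     def best(i, j):
--         if (i, j) not in memo:
--             x = matrix[i][j]
--             if i == 0 and j == 0:
--                 memo[(i, j)] = (x, x)
--             elif i == 0:
--                 hi, lo = best(i, j - 1)
--                 memo[(i, j)] = (hi + x, lo + x)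
--             elif j == 0:
--                 hi, lo = best(i - 1, j)
--                 memo[(i, j)] = (hi + x, lo + x)
--             else:
--                 h1, l1 = best(i - 1, j)
--                 h2, l2 = best(i, j - 1)
--                 memo[(i, j)] = (max(h1, h2) + x, min(l1, l2) + x)
--         return memo[(i, j)]
--
--     n = len(matrix)
--     return best(n - 1, n - 1)
-- ===== Notes on version B (the rewrite author's own statement) =====
-- stated objective: alternative
-- what changed: B replaces A's bottom-up DP with two preallocated n x n tables and four separate loop nests by a top-down memoized recursion best(i,j) that returns the (max,min) pair for reaching (i,j), called once at (n-1,n-1).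
import Mathlib
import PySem

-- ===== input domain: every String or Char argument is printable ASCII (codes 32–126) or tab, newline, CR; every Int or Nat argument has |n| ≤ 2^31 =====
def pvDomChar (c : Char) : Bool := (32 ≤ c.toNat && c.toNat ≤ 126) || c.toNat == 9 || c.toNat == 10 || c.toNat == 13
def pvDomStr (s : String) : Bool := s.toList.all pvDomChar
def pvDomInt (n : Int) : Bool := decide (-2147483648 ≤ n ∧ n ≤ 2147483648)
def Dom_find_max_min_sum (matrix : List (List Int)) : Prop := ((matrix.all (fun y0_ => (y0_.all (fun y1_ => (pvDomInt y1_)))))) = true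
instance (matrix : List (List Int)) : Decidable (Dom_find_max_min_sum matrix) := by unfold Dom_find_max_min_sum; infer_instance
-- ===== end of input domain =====

-- B replaces A's bottom-up DP (two n×n tables, four loop nests) by a top-down
-- memoized recursion best(i,j) returning the (max,min) pair (objective: alternative).

-- ===== PORT A =====
-- matrix[i][j] read / table[i][j] write, as in the Python (total via pyGetD/pySetD; in range under Pre_)
def pvGet2 (m : List (List Int)) (i j : Int) : Int :=
  PySem.List.pyGetD (PySem.List.pyGetD m i []) j 0

def pvSet2 (m : List (List Int)) (i j : Int) (v : Int) : List (List Int) :=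
  PySem.List.pySetD m i (PySem.List.pySetD (PySem.List.pyGetD m i []) j v)

def find_max_min_sum (matrix : List (List Int)) : Int × Int :=
  let n : Int := matrix.length
  let maxs0 := List.replicate n.toNat (List.replicate n.toNat (0 : Int))
  let mins0 := List.replicate n.toNat (List.replicate n.toNat (0 : Int))
  let maxs1 := pvSet2 maxs0 0 0 (pvGet2 matrix 0 0)
  let mins1 := pvSet2 mins0 0 0 (pvGet2 matrix 0 0)
  let st1 := (PySem.List.pyRange 1 n 1).foldl (fun (st : List (List Int) × List (List Int)) j =>
      (pvSet2 st.1 0 j (pvGet2 st.1 0 (j - 1) + pvGet2 matrix 0 j),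
       pvSet2 st.2 0 j (pvGet2 st.2 0 (j - 1) + pvGet2 matrix 0 j))) (maxs1, mins1)
  let st2 := (PySem.List.pyRange 1 n 1).foldl (fun (st : List (List Int) × List (List Int)) i =>
      (pvSet2 st.1 i 0 (pvGet2 st.1 (i - 1) 0 + pvGet2 matrix i 0),
       pvSet2 st.2 i 0 (pvGet2 st.2 (i - 1) 0 + pvGet2 matrix i 0))) st1
  let st3 := (PySem.List.pyRange 1 n 1).foldl (fun (st : List (List Int) × List (List Int)) i =>
      (PySem.List.pyRange 1 n 1).foldl (fun (st' : List (List Int) × List (List Int)) j =>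
        (pvSet2 st'.1 i j (max (pvGet2 st'.1 (i - 1) j) (pvGet2 st'.1 i (j - 1)) + pvGet2 matrix i j),
         pvSet2 st'.2 i j (min (pvGet2 st'.2 (i - 1) j) (pvGet2 st'.2 i (j - 1)) + pvGet2 matrix i j))) st) st2
  (pvGet2 st3.1 (n - 1) (n - 1), pvGet2 st3.2 (n - 1) (n - 1))

-- ===== PORT B =====
-- Source B's recursive helper best(i, j), same branch order (i=0∧j=0 / i=0 / j=0 / else).
-- The Python memo dict is pure value caching and does not change any computed value,
-- so the Lean recursion carries the same recursive calls without the cache.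
def pvBestRec (matrix : List (List Int)) : Nat → Nat → Int × Int
  | 0, 0 =>
      (pvGet2 matrix ((0 : Nat) : Int) ((0 : Nat) : Int),
       pvGet2 matrix ((0 : Nat) : Int) ((0 : Nat) : Int))
  | 0, j + 1 =>
      ((pvBestRec matrix 0 j).1 + pvGet2 matrix ((0 : Nat) : Int) ((j + 1 : Nat) : Int),
       (pvBestRec matrix 0 j).2 + pvGet2 matrix ((0 : Nat) : Int) ((j + 1 : Nat) : Int))
  | i + 1, 0 =>
      ((pvBestRec matrix i 0).1 + pvGet2 matrix ((i + 1 : Nat) : Int) ((0 : Nat) : Int),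
       (pvBestRec matrix i 0).2 + pvGet2 matrix ((i + 1 : Nat) : Int) ((0 : Nat) : Int))
  | i + 1, j + 1 =>
      (max (pvBestRec matrix i (j + 1)).1 (pvBestRec matrix (i + 1) j).1 +
         pvGet2 matrix ((i + 1 : Nat) : Int) ((j + 1 : Nat) : Int),
       min (pvBestRec matrix i (j + 1)).2 (pvBestRec matrix (i + 1) j).2 +
         pvGet2 matrix ((i + 1 : Nat) : Int) ((j + 1 : Nat) : Int))
  termination_by i j => (i, j)

-- best(n-1, n-1); for n = 0 the Python raises IndexError (excluded by Pre_),
-- here Nat subtraction gives best(0,0).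
def find_max_min_sum_alt (matrix : List (List Int)) : Int × Int :=
  pvBestRec matrix (matrix.length - 1) (matrix.length - 1)

-- ===== PRECONDITION & SPEC =====
-- Pre_ excludes exactly the inputs where A raises IndexError: the empty matrix and
-- matrices with a row shorter than the number of rows (B raises there too).
def Pre_find_max_min_sum (matrix : List (List Int)) : Prop :=
  matrix ≠ [] ∧ ∀ row ∈ matrix, matrix.length ≤ row.length

instance (matrix : List (List Int)) : Decidable (Pre_find_max_min_sum matrix) := by
  unfold Pre_find_max_min_sum; infer_instance

def pvWitness_find_max_min_sum : List (List Int) := [[1, 2], [3, 4]]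

def Spec_find_max_min_sum (matrix : List (List Int)) (out : Int × Int) : Prop := out = find_max_min_sum_alt matrix
instance (matrix : List (List Int)) (out : Int × Int) : Decidable (Spec_find_max_min_sum matrix out) := by unfold Spec_find_max_min_sum; infer_instance

-- ===== CLAIM (what is proved, stated in full; the proofs are below) =====
def Claim_equal_find_max_min_sum : Prop := ∀ (matrix : List (List Int)), Dom_find_max_min_sum matrix → Pre_find_max_min_sum matrix → Spec_find_max_min_sum matrix (find_max_min_sum matrix)

-- ===== LEMMAS AND PROOFS =====

def bestF (f : Int → Int → Int) (g : Nat → Nat → Int) : Nat → Nat → Int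
  | 0, 0 => g 0 0
  | 0, j + 1 => bestF f g 0 j + g 0 (j + 1)
  | i + 1, 0 => bestF f g i 0 + g (i + 1) 0
  | i + 1, j + 1 => f (bestF f g i (j + 1)) (bestF f g (i + 1) j) + g (i + 1) (j + 1)

def gOf (matrix : List (List Int)) (i j : Nat) : Int := (matrix.getD i []).getD j 0

theorem pvGet2_cast (m : List (List Int)) (i j : Nat) :
    pvGet2 m (i : Int) (j : Int) = (m.getD i []).getD j 0 := by
  simp [pvGet2, PySem.List.pyGetD_natCast]

-- table ~ function relation for A's DP tables
def TRel (T : List (List Int)) (n : Nat) (F : Nat → Nat → Int) : Prop :=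
  T.length = n ∧ (∀ i, i < n → (T.getD i []).length = n) ∧
    ∀ i j, i < n → j < n → (T.getD i []).getD j 0 = F i j

theorem TRel_zeros (n : Nat) :
    TRel (List.replicate n (List.replicate n (0 : Int))) n (fun _ _ => 0) := by
  refine ⟨by simp, fun i hi => ?_, fun i j hi hj => ?_⟩
  · simp [List.getD, hi]
  · simp [List.getD, hi, hj]

theorem TRel_set (T : List (List Int)) (n : Nat) (F : Nat → Nat → Int)
    (h : TRel T n F) (a b : Nat) (ha : a < n) (hb : b < n) (v : Int) :
    TRel (pvSet2 T (a : Int) (b : Int) v) n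
      (fun i j => if i = a ∧ j = b then v else F i j) := by
  obtain ⟨hlen, hrow, hval⟩ := h
  have hset : pvSet2 T (a : Int) (b : Int) v = T.set a ((T.getD a []).set b v) := by
    simp [pvSet2, PySem.List.pySetD_natCast, PySem.List.pyGetD_natCast]
  rw [hset]
  have hga : ∀ i : Nat, i < n → (T.set a ((T.getD a []).set b v)).getD i [] =
      if i = a then (T.getD a []).set b v else T.getD i [] := by
    intro i hi
    rw [List.getD_eq_getElem?_getD, List.getElem?_set]
    by_cases h1 : i = a
    · subst h1
      rw [if_pos rfl, if_pos rfl, if_pos (by omega)]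
      rfl
    · rw [if_neg (fun hc => h1 hc.symm), if_neg h1, ← List.getD_eq_getElem?_getD]
  refine ⟨by simpa using hlen, fun i hi => ?_, fun i j hi hj => ?_⟩
  · rw [hga i hi]
    split_ifs with h1
    · simpa using hrow a ha
    · exact hrow i hi
  · rw [hga i hi]
    split_ifs with h1
    · subst h1
      have hlr : (T.getD i []).length = n := hrow i hi
      by_cases h2 : j = b
      · subst h2
        rw [List.getD_eq_getElem _ _ (by rw [List.length_set]; omega), List.getElem_set,
          if_pos rfl]
        simp
      · rw [List.getD_eq_getElem _ _ (by rw [List.length_set]; omega), List.getElem_set,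
          if_neg (by omega)]
        have he : (T.getD i [])[j] = (T.getD i []).getD j 0 :=
          (List.getD_eq_getElem _ _ (by omega)).symm
        rw [he, hval i j hi hj]
        simp [h2]
    · rw [hval i j hi hj]
      simp [h1]

theorem TRel_congr (T : List (List Int)) (n : Nat) (F F' : Nat → Nat → Int)
    (h : TRel T n F) (hFF : ∀ i j, i < n → j < n → F i j = F' i j) : TRel T n F' :=
  ⟨h.1, h.2.1, fun i j hi hj => (h.2.2 i j hi hj).trans (hFF i j hi hj)⟩

theorem TRel_get (T : List (List Int)) (n : Nat) (F : Nat → Nat → Int)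
    (h : TRel T n F) (i j : Nat) (hi : i < n) (hj : j < n) :
    pvGet2 T (i : Int) (j : Int) = F i j := by
  rw [pvGet2_cast]; exact h.2.2 i j hi hj

theorem pvPhase1 (matrix : List (List Int)) (f : Int → Int → Int) (b : Nat)
    (hb1 : 1 ≤ b) (hbn : b ≤ matrix.length) (T1 : List (List Int))
    (hT1 : TRel T1 matrix.length
      (fun i j => if i = 0 ∧ j = 0 then gOf matrix 0 0 else 0)) :
    TRel ((PySem.List.pyRange 1 (b : Int) 1).foldl
        (fun T j => pvSet2 T 0 j (pvGet2 T 0 (j - 1) + pvGet2 matrix 0 j)) T1)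
      matrix.length
      (fun i j => if i = 0 ∧ j < b then bestF f (gOf matrix) 0 j else 0) := by
  induction b, hb1 using Nat.le_induction with
  | base =>
    rw [PySem.List.pyRange_one_eq_nil (by norm_num)]
    refine TRel_congr _ _ _ _ hT1 (fun i j hi hj => ?_)
    by_cases hQ : i = 0 ∧ j = 0
    · obtain ⟨rfl, rfl⟩ := hQ
      rw [if_pos ⟨rfl, rfl⟩, if_pos ⟨rfl, by omega⟩]
      simp [bestF]
    · rw [if_neg hQ, if_neg (fun ⟨h1, h2⟩ => hQ ⟨h1, by omega⟩)]
  | succ b hb ih =>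
    have hN : 1 ≤ matrix.length := by omega
    have ihb := ih (by omega)
    have hsplit : PySem.List.pyRange 1 ((b : Int) + 1) 1 =
        PySem.List.pyRange 1 (b : Int) 1 ++ [(b : Int)] :=
      PySem.List.pyRange_one_succ_right (by exact_mod_cast hb)
    rw [show (((b : Nat) + 1 : Nat) : Int) = (b : Int) + 1 by push_cast; ring, hsplit,
      List.foldl_append]
    set Tb := (PySem.List.pyRange 1 (b : Int) 1).foldl
        (fun T j => pvSet2 T 0 j (pvGet2 T 0 (j - 1) + pvGet2 matrix 0 j)) T1 with hTb
    simp only [List.foldl_cons, List.foldl_nil]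
    have e1 : pvGet2 Tb 0 ((b : Int) - 1) = bestF f (gOf matrix) 0 (b - 1) := by
      have := TRel_get Tb matrix.length _ ihb 0 (b - 1) (by omega) (by omega)
      rw [if_pos ⟨rfl, by omega⟩] at this
      rw [← this, Nat.cast_sub hb]
      norm_num
    have e2 : pvGet2 matrix 0 (b : Int) = gOf matrix 0 b := by
      have := pvGet2_cast matrix 0 b
      norm_num at this
      rw [this, gOf, List.getD_eq_getElem?_getD, List.getD_eq_getElem?_getD]
    rw [e1, e2]
    have hset := TRel_set Tb matrix.length _ ihb 0 b (by omega) (by omega)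
      (bestF f (gOf matrix) 0 (b - 1) + gOf matrix 0 b)
    rw [show ((0 : Nat) : Int) = (0 : Int) by norm_num] at hset
    refine TRel_congr _ _ _ _ hset (fun i j hi hj => ?_)
    have hv : bestF f (gOf matrix) 0 b = bestF f (gOf matrix) 0 (b - 1) + gOf matrix 0 b := by
      obtain ⟨b', rfl⟩ : ∃ b', b = b' + 1 := ⟨b - 1, by omega⟩
      simp [bestF]
    by_cases hQ : i = 0 ∧ j < b + 1
    · obtain ⟨rfl, hjb⟩ := hQ
      by_cases h2 : j = b
      · subst h2
        rw [if_pos ⟨rfl, rfl⟩, if_pos ⟨rfl, hjb⟩, hv]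
      · rw [if_neg (fun hc => h2 hc.2), if_pos ⟨rfl, by omega⟩, if_pos ⟨rfl, hjb⟩]
    · have h1 : ¬(i = 0 ∧ j = b) := fun hc => hQ ⟨hc.1, by omega⟩
      have h2 : ¬(i = 0 ∧ j < b) := fun hc => hQ ⟨hc.1, by omega⟩
      rw [if_neg h1, if_neg h2, if_neg hQ]

theorem pvPhase2 (matrix : List (List Int)) (f : Int → Int → Int) (a : Nat)
    (ha1 : 1 ≤ a) (han : a ≤ matrix.length) (T2 : List (List Int))
    (hT2 : TRel T2 matrix.length
      (fun i j => if i = 0 then bestF f (gOf matrix) 0 j else 0)) :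
    TRel ((PySem.List.pyRange 1 (a : Int) 1).foldl
        (fun T i => pvSet2 T i 0 (pvGet2 T (i - 1) 0 + pvGet2 matrix i 0)) T2)
      matrix.length
      (fun i j => if i = 0 then bestF f (gOf matrix) 0 j
        else if j = 0 ∧ i < a then bestF f (gOf matrix) i 0 else 0) := by
  induction a, ha1 using Nat.le_induction with
  | base =>
    rw [PySem.List.pyRange_one_eq_nil (by norm_num)]
    refine TRel_congr _ _ _ _ hT2 (fun i j hi hj => ?_)
    by_cases h1 : i = 0
    · rw [if_pos h1, if_pos h1]
    · rw [if_neg h1, if_neg h1, if_neg (by omega)]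
  | succ a ha ih =>
    have hN : 1 ≤ matrix.length := by omega
    have iha := ih (by omega)
    rw [show (((a : Nat) + 1 : Nat) : Int) = (a : Int) + 1 by push_cast; ring,
      PySem.List.pyRange_one_succ_right (by exact_mod_cast ha), List.foldl_append]
    set Ta := (PySem.List.pyRange 1 (a : Int) 1).foldl
        (fun T i => pvSet2 T i 0 (pvGet2 T (i - 1) 0 + pvGet2 matrix i 0)) T2 with hTa
    simp only [List.foldl_cons, List.foldl_nil]
    have e1 : pvGet2 Ta ((a : Int) - 1) 0 = bestF f (gOf matrix) (a - 1) 0 := by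
      have := TRel_get Ta matrix.length _ iha (a - 1) 0 (by omega) (by omega)
      rw [show (((a : Nat) - 1 : Nat) : Int) = (a : Int) - 1 by omega,
        show ((0 : Nat) : Int) = (0 : Int) by norm_num] at this
      rw [this]
      by_cases h1 : a - 1 = 0
      · rw [if_pos h1, h1]
      · rw [if_neg h1, if_pos ⟨rfl, by omega⟩]
    have e2 : pvGet2 matrix (a : Int) 0 = gOf matrix a 0 := by
      have := pvGet2_cast matrix a 0
      norm_num at this
      rw [this, gOf, List.getD_eq_getElem?_getD, List.getD_eq_getElem?_getD]
    rw [e1, e2]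
    have hset := TRel_set Ta matrix.length _ iha a 0 (by omega) (by omega)
      (bestF f (gOf matrix) (a - 1) 0 + gOf matrix a 0)
    rw [show ((0 : Nat) : Int) = (0 : Int) by norm_num] at hset
    refine TRel_congr _ _ _ _ hset (fun i j hi hj => ?_)
    have hv : bestF f (gOf matrix) a 0 = bestF f (gOf matrix) (a - 1) 0 + gOf matrix a 0 := by
      obtain ⟨a', rfl⟩ : ∃ a', a = a' + 1 := ⟨a - 1, by omega⟩
      simp [bestF]
    by_cases hc : i = a ∧ j = 0
    · obtain ⟨rfl, rfl⟩ := hc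
      rw [if_pos ⟨rfl, rfl⟩, if_neg (by omega), if_pos ⟨rfl, by omega⟩, hv]
    · rw [if_neg hc]
      by_cases h1 : i = 0
      · rw [if_pos h1, if_pos h1]
      · rw [if_neg h1, if_neg h1]
        by_cases h2 : j = 0 ∧ i < a
        · rw [if_pos h2, if_pos ⟨h2.1, by omega⟩]
        · rw [if_neg h2, if_neg (by omega)]

def pvF3 (f : Int → Int → Int) (g : Nat → Nat → Int) (a b i j : Nat) : Int :=
  if i = 0 ∨ j = 0 ∨ i < a ∨ (i = a ∧ j < b) then bestF f g i j else 0

theorem pvPhase3Inner (matrix : List (List Int)) (f : Int → Int → Int) (a : Nat)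
    (ha1 : 1 ≤ a) (han : a < matrix.length) (b : Nat) (hb1 : 1 ≤ b)
    (hbn : b ≤ matrix.length) (T : List (List Int))
    (hT : TRel T matrix.length (pvF3 f (gOf matrix) a 1)) :
    TRel ((PySem.List.pyRange 1 (b : Int) 1).foldl
        (fun T' j => pvSet2 T' (a : Int) j
          (f (pvGet2 T' ((a : Int) - 1) j) (pvGet2 T' (a : Int) (j - 1)) +
            pvGet2 matrix (a : Int) j)) T)
      matrix.length (pvF3 f (gOf matrix) a b) := by
  induction b, hb1 using Nat.le_induction with
  | base => rw [PySem.List.pyRange_one_eq_nil (by norm_num)]; exact hT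
  | succ b hb ih =>
    have ihb := ih (by omega)
    rw [show (((b : Nat) + 1 : Nat) : Int) = (b : Int) + 1 by push_cast; ring,
      PySem.List.pyRange_one_succ_right (by exact_mod_cast hb), List.foldl_append]
    set Tb := (PySem.List.pyRange 1 (b : Int) 1).foldl
        (fun T' j => pvSet2 T' (a : Int) j
          (f (pvGet2 T' ((a : Int) - 1) j) (pvGet2 T' (a : Int) (j - 1)) +
            pvGet2 matrix (a : Int) j)) T with hTb
    simp only [List.foldl_cons, List.foldl_nil]
    have e1 : pvGet2 Tb ((a : Int) - 1) (b : Int) = bestF f (gOf matrix) (a - 1) b := by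
      have := TRel_get Tb matrix.length _ ihb (a - 1) b (by omega) (by omega)
      rw [show (((a : Nat) - 1 : Nat) : Int) = (a : Int) - 1 by omega] at this
      rw [this, pvF3]
      by_cases h1 : a - 1 = 0
      · rw [if_pos (Or.inl h1), h1]
      · rw [if_pos (Or.inr (Or.inr (Or.inl (by omega))))]
    have e2 : pvGet2 Tb (a : Int) ((b : Int) - 1) = bestF f (gOf matrix) a (b - 1) := by
      have := TRel_get Tb matrix.length _ ihb a (b - 1) (by omega) (by omega)
      rw [show (((b : Nat) - 1 : Nat) : Int) = (b : Int) - 1 by omega] at this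
      rw [this, pvF3]
      by_cases h1 : b - 1 = 0
      · rw [if_pos (Or.inr (Or.inl h1)), h1]
      · rw [if_pos (Or.inr (Or.inr (Or.inr ⟨rfl, by omega⟩)))]
    have e3 : pvGet2 matrix (a : Int) (b : Int) = gOf matrix a b := by
      rw [pvGet2_cast matrix a b, gOf]
    rw [e1, e2, e3]
    have hset := TRel_set Tb matrix.length _ ihb a b (by omega) (by omega)
      (f (bestF f (gOf matrix) (a - 1) b) (bestF f (gOf matrix) a (b - 1)) + gOf matrix a b)
    refine TRel_congr _ _ _ _ hset (fun i j hi hj => ?_)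
    have hv : bestF f (gOf matrix) a b =
        f (bestF f (gOf matrix) (a - 1) b) (bestF f (gOf matrix) a (b - 1)) + gOf matrix a b := by
      obtain ⟨a', rfl⟩ : ∃ a', a = a' + 1 := ⟨a - 1, by omega⟩
      obtain ⟨b', rfl⟩ : ∃ b', b = b' + 1 := ⟨b - 1, by omega⟩
      simp [bestF]
    by_cases hc : i = a ∧ j = b
    · obtain ⟨rfl, rfl⟩ := hc
      rw [if_pos ⟨rfl, rfl⟩, pvF3, if_pos (by omega), hv]
    · rw [if_neg hc]
      simp only [pvF3]
      by_cases hP : i = 0 ∨ j = 0 ∨ i < a ∨ (i = a ∧ j < b)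
      · rw [if_pos hP, if_pos (by omega)]
      · rw [if_neg hP, if_neg (by omega)]

theorem pvPhase3Outer (matrix : List (List Int)) (f : Int → Int → Int) (a : Nat)
    (ha1 : 1 ≤ a) (han : a ≤ matrix.length) (T2 : List (List Int))
    (hT2 : TRel T2 matrix.length (pvF3 f (gOf matrix) 1 1)) :
    TRel ((PySem.List.pyRange 1 (a : Int) 1).foldl
        (fun T i => (PySem.List.pyRange 1 (matrix.length : Int) 1).foldl
          (fun T' j => pvSet2 T' i j
            (f (pvGet2 T' (i - 1) j) (pvGet2 T' i (j - 1)) + pvGet2 matrix i j)) T) T2)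
      matrix.length (pvF3 f (gOf matrix) a 1) := by
  induction a, ha1 using Nat.le_induction with
  | base =>
    rw [show PySem.List.pyRange 1 (((1 : Nat) : Int)) 1 = [] from
      PySem.List.pyRange_one_eq_nil (by norm_num)]
    exact hT2
  | succ a ha ih =>
    have iha := ih (by omega)
    rw [show (((a : Nat) + 1 : Nat) : Int) = (a : Int) + 1 by push_cast; ring,
      PySem.List.pyRange_one_succ_right (by exact_mod_cast ha), List.foldl_append]
    simp only [List.foldl_cons, List.foldl_nil]
    have hin := pvPhase3Inner matrix f a ha (by omega) matrix.length (by omega) le_rfl _ iha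
    refine TRel_congr _ _ _ _ hin (fun i j hi hj => ?_)
    simp only [pvF3]
    by_cases hP : i = 0 ∨ j = 0 ∨ i < a ∨ (i = a ∧ j < matrix.length)
    · rw [if_pos hP, if_pos (by omega)]
    · rw [if_neg hP, if_neg (by omega)]

theorem pvFoldlProd' {α β γ : Type} (F : α × β → γ → α × β) (f : α → γ → α)
    (g : β → γ → β) (l : List γ) (p : α × β)
    (h : ∀ s e, F s e = (f s.1 e, g s.2 e)) :
    l.foldl F p = (l.foldl f p.1, l.foldl g p.2) := by
  induction l generalizing p with
  | nil => rfl
  | cons x xs ih => rw [List.foldl_cons, h, ih]; rfl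

theorem pvSplit1 (matrix : List (List Int)) (p : List (List Int) × List (List Int)) :
    (PySem.List.pyRange 1 (matrix.length : Int) 1).foldl
      (fun st j => (pvSet2 st.1 0 j (pvGet2 st.1 0 (j - 1) + pvGet2 matrix 0 j),
                    pvSet2 st.2 0 j (pvGet2 st.2 0 (j - 1) + pvGet2 matrix 0 j))) p =
    ((PySem.List.pyRange 1 (matrix.length : Int) 1).foldl
      (fun T j => pvSet2 T 0 j (pvGet2 T 0 (j - 1) + pvGet2 matrix 0 j)) p.1,
     (PySem.List.pyRange 1 (matrix.length : Int) 1).foldl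
      (fun T j => pvSet2 T 0 j (pvGet2 T 0 (j - 1) + pvGet2 matrix 0 j)) p.2) :=
  pvFoldlProd' _ _ _ _ _ (fun _ _ => rfl)

theorem pvSplit2 (matrix : List (List Int)) (p : List (List Int) × List (List Int)) :
    (PySem.List.pyRange 1 (matrix.length : Int) 1).foldl
      (fun st i => (pvSet2 st.1 i 0 (pvGet2 st.1 (i - 1) 0 + pvGet2 matrix i 0),
                    pvSet2 st.2 i 0 (pvGet2 st.2 (i - 1) 0 + pvGet2 matrix i 0))) p =
    ((PySem.List.pyRange 1 (matrix.length : Int) 1).foldl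
      (fun T i => pvSet2 T i 0 (pvGet2 T (i - 1) 0 + pvGet2 matrix i 0)) p.1,
     (PySem.List.pyRange 1 (matrix.length : Int) 1).foldl
      (fun T i => pvSet2 T i 0 (pvGet2 T (i - 1) 0 + pvGet2 matrix i 0)) p.2) :=
  pvFoldlProd' _ _ _ _ _ (fun _ _ => rfl)

theorem pvSplit3 (matrix : List (List Int)) (p : List (List Int) × List (List Int)) :
    (PySem.List.pyRange 1 (matrix.length : Int) 1).foldl
      (fun st i => (PySem.List.pyRange 1 (matrix.length : Int) 1).foldl
        (fun st' j =>
          (pvSet2 st'.1 i j (max (pvGet2 st'.1 (i - 1) j) (pvGet2 st'.1 i (j - 1)) + pvGet2 matrix i j),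
           pvSet2 st'.2 i j (min (pvGet2 st'.2 (i - 1) j) (pvGet2 st'.2 i (j - 1)) + pvGet2 matrix i j))) st) p =
    ((PySem.List.pyRange 1 (matrix.length : Int) 1).foldl
      (fun T i => (PySem.List.pyRange 1 (matrix.length : Int) 1).foldl
        (fun T' j => pvSet2 T' i j
          (max (pvGet2 T' (i - 1) j) (pvGet2 T' i (j - 1)) + pvGet2 matrix i j)) T) p.1,
     (PySem.List.pyRange 1 (matrix.length : Int) 1).foldl
      (fun T i => (PySem.List.pyRange 1 (matrix.length : Int) 1).foldl
        (fun T' j => pvSet2 T' i j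
          (min (pvGet2 T' (i - 1) j) (pvGet2 T' i (j - 1)) + pvGet2 matrix i j)) T) p.2) :=
  pvFoldlProd' _ _ _ _ _ (fun _ _ => pvFoldlProd' _ _ _ _ _ (fun _ _ => rfl))

theorem pvAsideTable (matrix : List (List Int)) (f : Int → Int → Int)
    (hN : 1 ≤ matrix.length) :
    TRel ((PySem.List.pyRange 1 (matrix.length : Int) 1).foldl
        (fun T i => (PySem.List.pyRange 1 (matrix.length : Int) 1).foldl
          (fun T' j => pvSet2 T' i j
            (f (pvGet2 T' (i - 1) j) (pvGet2 T' i (j - 1)) + pvGet2 matrix i j)) T)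
        ((PySem.List.pyRange 1 (matrix.length : Int) 1).foldl
          (fun T i => pvSet2 T i 0 (pvGet2 T (i - 1) 0 + pvGet2 matrix i 0))
          ((PySem.List.pyRange 1 (matrix.length : Int) 1).foldl
            (fun T j => pvSet2 T 0 j (pvGet2 T 0 (j - 1) + pvGet2 matrix 0 j))
            (pvSet2 (List.replicate matrix.length (List.replicate matrix.length (0 : Int)))
              0 0 (pvGet2 matrix 0 0)))))
      matrix.length (pvF3 f (gOf matrix) matrix.length 1) := by
  have e0 : pvGet2 matrix 0 0 = gOf matrix 0 0 := by
    have := pvGet2_cast matrix 0 0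
    norm_num at this
    rw [this, gOf, List.getD_eq_getElem?_getD, List.getD_eq_getElem?_getD]
  have h0 := TRel_set _ matrix.length _ (TRel_zeros matrix.length) 0 0 (by omega) (by omega)
    (pvGet2 matrix 0 0)
  rw [show ((0 : Nat) : Int) = (0 : Int) by norm_num] at h0
  have h0' := TRel_congr _ _ _
    (fun i j => if i = 0 ∧ j = 0 then gOf matrix 0 0 else 0) h0
    (fun i j hi hj => by rw [e0])
  have h1 := pvPhase1 matrix f matrix.length hN le_rfl _ h0'
  have h1' := TRel_congr _ _ _ (fun i j => if i = 0 then bestF f (gOf matrix) 0 j else 0) h1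
    (fun i j hi hj => by
      beta_reduce
      by_cases h : i = 0
      · rw [if_pos ⟨h, hj⟩, if_pos h]
      · rw [if_neg (fun hc => h hc.1), if_neg h])
  have h2 := pvPhase2 matrix f matrix.length hN le_rfl _ h1'
  have h2' := TRel_congr _ _ _ (pvF3 f (gOf matrix) 1 1) h2
    (fun i j hi hj => by
      simp only [pvF3]
      by_cases h : i = 0
      · subst h
        rw [if_pos rfl, if_pos (Or.inl rfl)]
      · rw [if_neg h]
        by_cases h2 : j = 0
        · subst h2
          rw [if_pos ⟨rfl, by omega⟩, if_pos (Or.inr (Or.inl rfl))]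
        · rw [if_neg (fun hc => h2 hc.1), if_neg (by omega)])
  exact pvPhase3Outer matrix f matrix.length hN le_rfl _ h2'

theorem pvA_eq (matrix : List (List Int)) (hN : 1 ≤ matrix.length) :
    find_max_min_sum matrix =
      (bestF max (gOf matrix) (matrix.length - 1) (matrix.length - 1),
       bestF min (gOf matrix) (matrix.length - 1) (matrix.length - 1)) := by
  unfold find_max_min_sum
  simp only [Int.toNat_natCast]
  rw [pvSplit1, pvSplit2, pvSplit3]
  dsimp only
  have hmax := TRel_get _ _ _ (pvAsideTable matrix max hN) (matrix.length - 1)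
    (matrix.length - 1) (by omega) (by omega)
  have hmin := TRel_get _ _ _ (pvAsideTable matrix min hN) (matrix.length - 1)
    (matrix.length - 1) (by omega) (by omega)
  rw [show (((matrix.length : Nat) - 1 : Nat) : Int) = (matrix.length : Int) - 1 by omega]
    at hmax hmin
  simp only [pvF3] at hmax hmin
  rw [if_pos (by omega)] at hmax
  rw [if_pos (by omega)] at hmin
  rw [hmax, hmin]

-- ===== B-side proof: the recursion computes the bestF pair =====

theorem pvBestRec_eq (matrix : List (List Int)) (i j : Nat) :
    pvBestRec matrix i j =
      (bestF max (gOf matrix) i j, bestF min (gOf matrix) i j) := by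
  fun_induction pvBestRec matrix i j with
  | case1 =>
      have e := pvGet2_cast matrix 0 0
      push_cast at e
      simp [bestF, gOf, e]
  | case2 j ih =>
      have e := pvGet2_cast matrix 0 (j + 1)
      push_cast at e
      simp [bestF, gOf, ih, e]
  | case3 i ih =>
      have e := pvGet2_cast matrix (i + 1) 0
      push_cast at e
      simp [bestF, gOf, ih, e]
  | case4 i j ih1 ih2 =>
      have e := pvGet2_cast matrix (i + 1) (j + 1)
      push_cast at e
      simp [bestF, gOf, ih1, ih2, e]

-- ===== VERDICT (by name: the statement is the Claim_ definition above) =====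
theorem find_max_min_sum_spec : Claim_equal_find_max_min_sum := by
  intro matrix _ hpre
  unfold Spec_find_max_min_sum
  have hN : 1 ≤ matrix.length := by
    cases matrix with
    | nil => exact absurd rfl hpre.1
    | cons a l => simp
  rw [pvA_eq matrix hN]
  unfold find_max_min_sum_alt
  rw [pvBestRec_eq]
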